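-- pv_equiv track=rewrite | github.com/Tessa-Grace/EGE | class/KIM 25088499 (dz 18-03-25) #23/task-23-13972.py | f
-- ===== SOURCE A (Python) =====
-- def f(cur, fin, count = 0):
--     if cur == fin:
--         return 1
--     if cur > fin:
--         return 0
--     if count == 0 and cur < 23:
--         return f(cur + 2, fin, count=1) + f(cur * 2, fin, count=1)
--     return f(cur + 2, fin, count) + f(cur * 2, fin, count) + f(cur + 5, fin, count)
-- ===== SOURCE B (Python) =====
-- def f(cur, fin, count=0):
--     # Bottom-up DP over the states cur..fin-1 instead of top-down recursion.
--     if cur == fin: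
--         return 1
--     if cur > fin:
--         return 0
--     def val(t, x):
--         if x == fin:
--             return 1
--         if x > fin:
--             return 0
--         return t.get(x, 0)
--     g1 = {}  # g1[v] = number of sequences from v to fin once a first move was made
--     for v in range(fin - 1, cur - 1, -1):
--         g1[v] = val(g1, v + 2) + val(g1, 2 * v) + val(g1, v + 5)
--     if count == 0 and cur < 23:
--         return val(g1, cur + 2) + val(g1, 2 * cur)
--     return g1.get(cur, 0)
-- ===== Notes on version B (the rewrite author's own statement) =====
-- stated objective: alternative
-- what changed: Replaced A's three-way top-down recursion by a bottom-up dynamic program that fills a table of move-counts from fin-1 down to cur, reading each of the three successor states from the table.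
import Mathlib
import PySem

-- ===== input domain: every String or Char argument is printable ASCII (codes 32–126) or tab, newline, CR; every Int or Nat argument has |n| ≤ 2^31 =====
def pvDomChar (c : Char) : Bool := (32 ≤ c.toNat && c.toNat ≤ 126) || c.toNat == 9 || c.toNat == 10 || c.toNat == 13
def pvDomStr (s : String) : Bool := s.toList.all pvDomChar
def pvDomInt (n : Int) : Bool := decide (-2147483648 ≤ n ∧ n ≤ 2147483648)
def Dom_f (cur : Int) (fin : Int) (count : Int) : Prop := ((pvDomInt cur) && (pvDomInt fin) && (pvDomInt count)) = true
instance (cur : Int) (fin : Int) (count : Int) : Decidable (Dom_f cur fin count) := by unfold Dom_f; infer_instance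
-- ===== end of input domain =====

-- B replaces A's top-down recursion by a bottom-up DP table; equivalence is proved on Pre_f (where A terminates).

-- ===== PORT A =====
-- A's recursion has no structural bound; inside Pre_f every recursive call strictly
-- increases cur, so the depth is at most (fin - cur) + 1: the fuel counter only makes
-- the same computation total and is never exhausted inside Pre_f.
def fAux : Nat → Int → Int → Int → Int
  | 0, _, _, _ => 0
  | fuel+1, cur, fin, count =>
    if cur = fin then 1
    else if cur > fin then 0
    else if count = 0 ∧ cur < 23 then
      fAux fuel (cur + 2) fin 1 + fAux fuel (cur * 2) fin 1
    else
      fAux fuel (cur + 2) fin count + fAux fuel (cur * 2) fin count + fAux fuel (cur + 5) fin count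

def f (cur : Int) (fin : Int) (count : Int) : Int :=
  fAux ((fin - cur).toNat + 1) cur fin count

-- ===== PORT B =====
-- port of Source B's helper val(t, x)
def fVal (fin : Int) (t : PySem.Dict Int Int) (x : Int) : Int :=
  if x = fin then 1 else if x > fin then 0 else t.getD x 0

-- port of Source B's table-filling loop 'for v in range(fin - 1, cur - 1, -1): g1[v] = ...'
def fDP (cur : Int) (fin : Int) : PySem.Dict Int Int :=
  (PySem.List.pyRange (fin - 1) (cur - 1) (-1)).foldl
    (fun t v => t.insert v (fVal fin t (v + 2) + fVal fin t (2 * v) + fVal fin t (v + 5)))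
    PySem.Dict.empty

def f_alt (cur : Int) (fin : Int) (count : Int) : Int :=
  if cur = fin then 1
  else if cur > fin then 0
  else if count = 0 ∧ cur < 23 then
    fVal fin (fDP cur fin) (cur + 2) + fVal fin (fDP cur fin) (2 * cur)
  else (fDP cur fin).getD cur 0

-- ===== PRECONDITION & SPEC =====
-- Pre_f excludes exactly the inputs on which Python A never returns (RecursionError):
-- for cur ≤ 0 with cur < fin the cur*2 branch no longer increases cur, so A recurses forever.
def Pre_f (cur : Int) (fin : Int) (count : Int) : Prop := 0 < cur ∨ fin ≤ cur
instance (cur : Int) (fin : Int) (count : Int) : Decidable (Pre_f cur fin count) := by unfold Pre_f; infer_instance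
def pvWitness_f : Int × Int × Int := (1, 10, 0)

def Spec_f (cur : Int) (fin : Int) (count : Int) (out : Int) : Prop := out = f_alt cur fin count
instance (cur : Int) (fin : Int) (count : Int) (out : Int) : Decidable (Spec_f cur fin count out) := by unfold Spec_f; infer_instance

-- ===== CLAIM (what is proved, stated in full; the proofs are below) =====
def Claim_equal_f : Prop := ∀ (cur : Int) (fin : Int) (count : Int), Dom_f cur fin count → Pre_f cur fin count → Spec_f cur fin count (f cur fin count)

-- ===== LEMMAS AND PROOFS =====

-- one-step unfolding of fAux (kept explicit so rewriting does not recurse)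
theorem fAux_succ (fuel : Nat) (cur fin count : Int) :
    fAux (fuel + 1) cur fin count =
      (if cur = fin then 1
       else if cur > fin then 0
       else if count = 0 ∧ cur < 23 then
         fAux fuel (cur + 2) fin 1 + fAux fuel (cur * 2) fin 1
       else
         fAux fuel (cur + 2) fin count + fAux fuel (cur * 2) fin count + fAux fuel (cur + 5) fin count) := rfl

-- canonical value of the three-move recursion (count ≠ 0) with just-sufficient fuel
def G (fin x : Int) : Int := fAux ((fin - x).toNat + 1) x fin 1

-- once count ≠ 0 (or cur ≥ 23, whence all successors stay ≥ 23) the count argument is irrelevant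
theorem fAux_count (fuel : Nat) : ∀ (cur fin count : Int), (count ≠ 0 ∨ 23 ≤ cur) →
    fAux fuel cur fin count = fAux fuel cur fin 1 := by
  induction fuel with
  | zero => intro cur fin count h; rfl
  | succ m ih =>
    intro cur fin count h
    rw [fAux_succ, fAux_succ]
    have hr : ¬((1:Int) = 0 ∧ cur < 23) := by omega
    rw [if_neg hr]
    by_cases h1 : cur = fin
    · rw [if_pos h1, if_pos h1]
    rw [if_neg h1, if_neg h1]
    by_cases h2 : cur > fin
    · rw [if_pos h2, if_pos h2]
    rw [if_neg h2, if_neg h2]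
    have hl : ¬(count = 0 ∧ cur < 23) := by omega
    rw [if_neg hl]
    have h' : count ≠ 0 ∨ (23:Int) ≤ cur + 2 := by omega
    have h'' : count ≠ 0 ∨ (23:Int) ≤ cur * 2 := by
      rcases h with h | h
      · exact Or.inl h
      · right; nlinarith
    have h''' : count ≠ 0 ∨ (23:Int) ≤ cur + 5 := by omega
    rw [ih _ _ _ h', ih _ _ _ h'', ih _ _ _ h''']

-- fuel irrelevance: with cur ≥ 1 any fuel above the recursion depth gives the same value
theorem fAux_fuel : ∀ (n : Nat) (cur fin count : Int) (fuel₁ fuel₂ : Nat), 1 ≤ cur →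
    (fin - cur).toNat < n → n ≤ fuel₁ → n ≤ fuel₂ →
    fAux fuel₁ cur fin count = fAux fuel₂ cur fin count := by
  intro n
  induction n with
  | zero => intro _ _ _ _ _ _ h _ _; omega
  | succ m ih =>
    intro cur fin count fuel₁ fuel₂ hcur hn h1 h2
    obtain ⟨a, rfl⟩ : ∃ a, fuel₁ = a + 1 := ⟨fuel₁ - 1, by omega⟩
    obtain ⟨b, rfl⟩ : ∃ b, fuel₂ = b + 1 := ⟨fuel₂ - 1, by omega⟩
    rw [fAux_succ, fAux_succ]
    by_cases h3 : cur = fin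
    · rw [if_pos h3, if_pos h3]
    rw [if_neg h3, if_neg h3]
    by_cases h4 : cur > fin
    · rw [if_pos h4, if_pos h4]
    rw [if_neg h4, if_neg h4]
    have hlt : cur < fin := by omega
    have c2 : cur + 1 ≤ cur * 2 := by nlinarith
    have hx2 : (1:Int) ≤ cur * 2 := by omega
    have d1 : (fin - (cur + 2)).toNat < m := by omega
    have d2 : (fin - cur * 2).toNat < m := by omega
    have d3 : (fin - (cur + 5)).toNat < m := by omega
    by_cases h5 : count = 0 ∧ cur < 23
    · rw [if_pos h5, if_pos h5]
      rw [ih (cur + 2) fin 1 a b (by omega) d1 (by omega) (by omega),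
          ih (cur * 2) fin 1 a b hx2 d2 (by omega) (by omega)]
    · rw [if_neg h5, if_neg h5]
      rw [ih (cur + 2) fin count a b (by omega) d1 (by omega) (by omega),
          ih (cur * 2) fin count a b hx2 d2 (by omega) (by omega),
          ih (cur + 5) fin count a b (by omega) d3 (by omega) (by omega)]

theorem fAux_eq_G (cur fin count : Int) (fuel : Nat) (hcur : 1 ≤ cur)
    (hfuel : (fin - cur).toNat + 1 ≤ fuel) (hc : count ≠ 0 ∨ 23 ≤ cur) :
    fAux fuel cur fin count = G fin cur := by
  rw [fAux_count fuel cur fin count hc]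
  exact fAux_fuel ((fin - cur).toNat + 1) cur fin 1 fuel ((fin - cur).toNat + 1)
    hcur (by omega) hfuel (by omega)

theorem G_eq_of_eq (fin x : Int) (h : x = fin) : G fin x = 1 := by
  subst h
  rw [G, Int.sub_self, Int.toNat_zero, fAux_succ, if_pos rfl]

theorem G_eq_of_gt (fin x : Int) (h : fin < x) : G fin x = 0 := by
  have hne : ¬ x = fin := by omega
  have h0 : (fin - x).toNat = 0 := by omega
  rw [G, h0, fAux_succ, if_neg hne, if_pos (by omega : x > fin)]

-- the recurrence satisfied by G on 1 ≤ x < fin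
theorem G_step (fin x : Int) (h1 : 1 ≤ x) (h2 : x < fin) :
    G fin x = G fin (x + 2) + G fin (x * 2) + G fin (x + 5) := by
  have c2 : x + 1 ≤ x * 2 := by nlinarith
  have hx2 : (1:Int) ≤ x * 2 := by omega
  rw [G, show (fin - x).toNat + 1 = ((fin - x).toNat - 1 + 1) + 1 by omega, fAux_succ]
  have hne : ¬ x = fin := by omega
  have hng : ¬ x > fin := by omega
  have hnc : ¬ ((1:Int) = 0 ∧ x < 23) := by omega
  rw [if_neg hne, if_neg hng, if_neg hnc]
  rw [fAux_eq_G (x + 2) fin 1 _ (by omega) (by omega) (Or.inl (by omega)),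
      fAux_eq_G (x * 2) fin 1 _ hx2 (by omega) (Or.inl (by omega)),
      fAux_eq_G (x + 5) fin 1 _ (by omega) (by omega) (Or.inl (by omega))]

-- fVal reads the table like G, given the table is correct on [lo, fin)
theorem fVal_eq_G (fin : Int) (t : PySem.Dict Int Int) (lo x : Int)
    (hinv : ∀ y, lo ≤ y → y < fin → t.getD y 0 = G fin y)
    (hx : lo ≤ x) : fVal fin t x = G fin x := by
  unfold fVal
  split_ifs with h1 h2
  · rw [G_eq_of_eq fin x h1]
  · rw [G_eq_of_gt fin x h2]
  · exact hinv x hx (by omega)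

-- peel the last (smallest) element of the countdown fold
theorem fDP_succ (fin lo : Int) (h : lo < fin) :
    fDP lo fin = (fDP (lo + 1) fin).insert lo
      (fVal fin (fDP (lo + 1) fin) (lo + 2) + fVal fin (fDP (lo + 1) fin) (2 * lo) +
       fVal fin (fDP (lo + 1) fin) (lo + 5)) := by
  unfold fDP
  rw [PySem.List.pyRange_neg_one_eq_reverse, PySem.List.pyRange_neg_one_eq_reverse]
  rw [show lo - 1 + 1 = lo by ring, show fin - 1 + 1 = fin by ring, show lo + 1 - 1 + 1 = lo + 1 by ring]
  rw [PySem.List.pyRange_one_cons h, List.reverse_cons, List.foldl_append]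
  rfl

-- table correctness
theorem fDP_inv : ∀ (n : Nat) (fin lo : Int), 1 ≤ lo → (fin - lo).toNat = n →
    ∀ x, lo ≤ x → x < fin → (fDP lo fin).getD x 0 = G fin x := by
  intro n
  induction n with
  | zero => intro fin lo _ hn x hx1 hx2; omega
  | succ m ih =>
    intro fin lo hlo hn x hx1 hx2
    have hlt : lo < fin := by omega
    have ihinv : ∀ y, lo + 1 ≤ y → y < fin → (fDP (lo + 1) fin).getD y 0 = G fin y :=
      ih fin (lo + 1) (by omega) (by omega)
    rw [fDP_succ fin lo hlt, PySem.Dict.getD_insert]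
    split_ifs with hx
    · subst hx
      have c2 : x + 1 ≤ 2 * x := by nlinarith
      rw [fVal_eq_G fin _ (x + 1) (x + 2) ihinv (by omega),
          fVal_eq_G fin _ (x + 1) (2 * x) ihinv (by omega),
          fVal_eq_G fin _ (x + 1) (x + 5) ihinv (by omega)]
      rw [G_step fin x hlo hlt, show x * 2 = 2 * x by ring]
    · exact ihinv x (by omega) hx2

-- ===== VERDICT (by name: the statement is the Claim_ definition above) =====
theorem f_spec : Claim_equal_f := by
  intro cur fin count _ hpre
  unfold Spec_f f f_alt
  by_cases h1 : cur = fin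
  · subst h1
    rw [Int.sub_self, Int.toNat_zero, fAux_succ, if_pos rfl, if_pos rfl]
  rw [if_neg h1]
  by_cases h2 : cur > fin
  · have h0 : (fin - cur).toNat = 0 := by omega
    rw [h0, fAux_succ, if_neg h1, if_pos h2, if_pos h2]
  rw [if_neg h2]
  have hcur : 1 ≤ cur := by rcases hpre with h | h; omega; omega
  have hlt : cur < fin := by omega
  have hinv : ∀ y, cur ≤ y → y < fin → (fDP cur fin).getD y 0 = G fin y :=
    fDP_inv (fin - cur).toNat fin cur hcur rfl
  have c2 : cur + 1 ≤ cur * 2 := by nlinarith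
  have hx2 : (1:Int) ≤ cur * 2 := by omega
  rw [show (fin - cur).toNat + 1 = ((fin - cur).toNat - 1 + 1) + 1 by omega, fAux_succ,
      if_neg h1, if_neg h2]
  by_cases h3 : count = 0 ∧ cur < 23
  · rw [if_pos h3, if_pos h3]
    rw [fAux_eq_G (cur + 2) fin 1 _ (by omega) (by omega) (Or.inl (by omega)),
        fAux_eq_G (cur * 2) fin 1 _ hx2 (by omega) (Or.inl (by omega))]
    rw [fVal_eq_G fin _ cur (cur + 2) hinv (by omega),
        fVal_eq_G fin _ cur (2 * cur) hinv (by omega),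
        show cur * 2 = 2 * cur by ring]
  · rw [if_neg h3, if_neg h3]
    have hc2 : count ≠ 0 ∨ 23 ≤ cur * 2 := by
      by_cases hc0 : count = 0
      · right; subst hc0; simp at h3; nlinarith [h3]
      · exact Or.inl hc0
    rw [fAux_eq_G (cur + 2) fin count _ (by omega) (by omega) (by omega),
        fAux_eq_G (cur * 2) fin count _ hx2 (by omega) hc2,
        fAux_eq_G (cur + 5) fin count _ (by omega) (by omega) (by omega)]
    rw [hinv cur (by omega) hlt, G_step fin cur hcur hlt]
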